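-- pv_equiv track=rewrite | github.com/Sangavi-123/HackerRank-samples | arrayDiagnols.py | alt_diag
-- ===== SOURCE A (Python) =====
-- def alt_diag(array1):
-- 	alt_d=[]
-- 	#length is reduced by one, because the maximum index in the nested list is 0 to 1-the max length
-- 	#-----------------------------------------------------------------------------------------------
-- 	l=len(array1[1])-1
-- 	for i in range(0,4):
-- 		for j in range(0,4):
-- 			if j==l:
-- 				alt_d.append(array1[i][j])
-- 		l-=1
-- 	return alt_d
-- ===== SOURCE B (Python) =====
-- def alt_diag(array1):
--     l = len(array1[1]) - 1
--     return [array1[i][l - i] for i in range(max(0, l - 3), min(4, l + 1))]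
-- ===== Notes on version B (the rewrite author's own statement) =====
-- stated objective: simpler
-- what changed: Replaces A's 4x4 nested scan with decremented state by a closed-form computation of the valid row interval [max(0,l-3), min(4,l+1)) and a direct comprehension array1[i][l-i] over it, eliminating both the inner search loop and the per-iteration guard.
import Mathlib
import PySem

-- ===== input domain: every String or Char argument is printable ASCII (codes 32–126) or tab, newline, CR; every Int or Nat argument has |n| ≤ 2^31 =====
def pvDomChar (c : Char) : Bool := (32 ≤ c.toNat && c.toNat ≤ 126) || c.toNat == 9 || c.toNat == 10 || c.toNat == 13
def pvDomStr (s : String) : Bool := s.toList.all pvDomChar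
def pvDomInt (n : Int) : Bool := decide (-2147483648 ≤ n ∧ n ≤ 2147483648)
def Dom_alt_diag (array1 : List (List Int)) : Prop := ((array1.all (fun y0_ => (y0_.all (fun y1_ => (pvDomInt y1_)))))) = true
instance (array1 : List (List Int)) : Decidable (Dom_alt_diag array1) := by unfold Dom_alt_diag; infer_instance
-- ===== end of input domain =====

-- B computes the valid row interval [max(0,l-3), min(4,l+1)) in closed form and maps the direct
-- read array1[i][l-i] over it, replacing A's 4x4 nested scan with decremented state; objective: simpler.

-- ===== PORT A =====
def alt_diag (array1 : List (List Int)) : List Int :=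
  let l : Int := (((PySem.List.pyGet? array1 1).getD []).length : Int) - 1
  ((PySem.List.pyRange 0 4 1).foldl (fun (st : List Int × Int) i =>
    ((PySem.List.pyRange 0 4 1).foldl (fun acc j =>
      if j == st.2 then
        acc ++ [(PySem.List.pyGet? ((PySem.List.pyGet? array1 i).getD []) j).getD 0]
      else acc) st.1,
     st.2 - 1)) ([], l)).1

-- ===== PORT B =====
def alt_diag_alt (array1 : List (List Int)) : List Int :=
  let l : Int := (((PySem.List.pyGet? array1 1).getD []).length : Int) - 1
  (PySem.List.pyRange (max 0 (l - 3)) (min 4 (l + 1)) 1).map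
    (fun i => (PySem.List.pyGet? ((PySem.List.pyGet? array1 i).getD []) (l - i)).getD 0)

-- ===== PRECONDITION & SPEC =====
-- Pre_ excludes exactly the inputs on which Python A raises IndexError: array1[1] must exist,
-- and whenever the anti-diagonal column l = len(array1[1])-1-i is in range(4), both array1[i]
-- and array1[i][l] must exist.
def Pre_alt_diag (array1 : List (List Int)) : Prop :=
  2 ≤ array1.length ∧
  ∀ i : Fin 4,
    (0 ≤ ((array1.getD 1 []).length : Int) - 1 - i.val ∧
     ((array1.getD 1 []).length : Int) - 1 - i.val < 4) →
    i.val < array1.length ∧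
    (((array1.getD 1 []).length : Int) - 1 - i.val).toNat < (array1.getD i.val []).length
instance (array1 : List (List Int)) : Decidable (Pre_alt_diag array1) := by unfold Pre_alt_diag; infer_instance
def pvWitness_alt_diag : List (List Int) :=
  [[1,2,3,4],[5,6,7,8],[9,10,11,12],[13,14,15,16]]
def Spec_alt_diag (array1 : List (List Int)) (out : List Int) : Prop := out = alt_diag_alt array1
instance (array1 : List (List Int)) (out : List Int) : Decidable (Spec_alt_diag array1 out) := by unfold Spec_alt_diag; infer_instance

-- ===== CLAIM (what is proved, stated in full; the proofs are below) =====
def Claim_equal_alt_diag : Prop := ∀ (array1 : List (List Int)), Dom_alt_diag array1 → Pre_alt_diag array1 → Spec_alt_diag array1 (alt_diag array1)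

-- ===== LEMMAS AND PROOFS =====

-- A's inner search loop over j collapses to one guarded indexed read at column l.
theorem inner_eq (row acc : List Int) (l : Int) :
    ([0, 1, 2, 3].foldl (fun acc j =>
      if j == l then acc ++ [(PySem.List.pyGet? row j).getD 0] else acc) acc)
    = (if 0 ≤ l ∧ l < 4 then acc ++ [(PySem.List.pyGet? row l).getD 0] else acc) := by
  simp only [List.foldl, beq_iff_eq]
  split_ifs <;> try omega
  all_goals (subst_vars; rfl)

-- A's outer loop (inner loop already collapsed) equals the map over the closed-form interval
-- of valid rows: 0 ≤ i < 4 and 0 ≤ l - i < 4 iff max 0 (l-3) ≤ i < min 4 (l+1).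
theorem unrolled_eq (l : Int) (g : Int → Int → Int) :
    (([0, 1, 2, 3] : List Int).foldl (fun (st : List Int × Int) i =>
      ((if 0 ≤ st.2 ∧ st.2 < 4 then st.1 ++ [g i st.2] else st.1), st.2 - 1)) ([], l)).1
    = (PySem.List.pyRange (max 0 (l - 3)) (min 4 (l + 1)) 1).map (fun i => g i (l - i)) := by
  rcases lt_or_ge l 0 with hl | _
  · rw [PySem.List.pyRange_one_eq_nil (by omega)]
    simp only [List.foldl]
    split_ifs <;> first | omega | rfl
  · rcases lt_or_ge l 7 with hl7 | hl7
    · interval_cases l <;>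
        simp [List.foldl, PySem.List.pyRange_one, List.range_succ] <;> norm_num
    · rw [PySem.List.pyRange_one_eq_nil (by omega)]
      simp only [List.foldl]
      split_ifs <;> first | omega | rfl

-- The two ports agree on every input (the index sets coincide on all inputs; inside Pre_ the
-- defaulted out-of-range reads never occur).
theorem ports_eq (array1 : List (List Int)) : alt_diag array1 = alt_diag_alt array1 := by
  unfold alt_diag alt_diag_alt
  have hr : PySem.List.pyRange 0 4 1 = [0, 1, 2, 3] := by decide
  rw [hr]
  have hfg : (fun (st : List Int × Int) (i : Int) =>
      ((([0, 1, 2, 3] : List Int).foldl (fun acc j =>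
        if j == st.2 then acc ++ [(PySem.List.pyGet? ((PySem.List.pyGet? array1 i).getD []) j).getD 0]
        else acc) st.1), st.2 - 1))
    = (fun (st : List Int × Int) (i : Int) =>
      ((if 0 ≤ st.2 ∧ st.2 < 4 then
          st.1 ++ [(PySem.List.pyGet? ((PySem.List.pyGet? array1 i).getD []) st.2).getD 0]
        else st.1), st.2 - 1)) := by
    funext st i
    rw [inner_eq]
  rw [hfg]
  exact unrolled_eq _ (fun i j => (PySem.List.pyGet? ((PySem.List.pyGet? array1 i).getD []) j).getD 0)

-- ===== VERDICT (by name: the statement is the Claim_ definition above) =====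
theorem alt_diag_spec : Claim_equal_alt_diag := by
  intro a _ _
  unfold Spec_alt_diag
  exact ports_eq a
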